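-- pv_equiv track=rewrite | github.com/hoahanie/practice | 22-9-2020/productlessthanK.py | countProduct
-- ===== SOURCE A (Python) =====
-- def countProduct(num,k):
--     s=1
--     j=0
--     count1=0
--     while j<len(num):
--         if s*num[j]<k:
--             s=s*num[j]
--             count1+=1
--             j+=1
--         else:
--             break
--     return count1
-- ===== SOURCE B (Python) =====
-- def countProduct(num, k):
--     # Tracks the running product in capped sign-magnitude form (zero flag, sign,
--     # magnitude clamped at abs(k)+1), which decides every comparison with k
--     # exactly while keeping all arithmetic bounded; builds the full list of
--     # below-k flags and returns the position of the first failure.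
--     cap = abs(k) + 1
--     sign, mag, zero = 1, 1, False
--     below = []
--     for x in num:
--         if x == 0:
--             zero = True
--         elif x < 0:
--             sign, mag = -sign, min(mag * -x, cap)
--         else:
--             mag = min(mag * x, cap)
--         if zero:
--             below.append(0 < k)
--         elif sign > 0:
--             below.append(mag < k)
--         else:
--             below.append(-mag < k)
--     return below.index(False) if False in below else len(below)
-- ===== Notes on version B (the rewrite author's own statement) =====
-- stated objective: alternative
-- what changed: B replaces the early-breaking exact-product scan by a capped sign-magnitude representation of the running product (zero flag, sign, magnitude clamped at abs(k)+1, which still decides every comparison with k exactly), builds the whole list of below-k flags, and returns the index of the first False; this keeps every multiplication bounded where A's products can grow without limit.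
import Mathlib
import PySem

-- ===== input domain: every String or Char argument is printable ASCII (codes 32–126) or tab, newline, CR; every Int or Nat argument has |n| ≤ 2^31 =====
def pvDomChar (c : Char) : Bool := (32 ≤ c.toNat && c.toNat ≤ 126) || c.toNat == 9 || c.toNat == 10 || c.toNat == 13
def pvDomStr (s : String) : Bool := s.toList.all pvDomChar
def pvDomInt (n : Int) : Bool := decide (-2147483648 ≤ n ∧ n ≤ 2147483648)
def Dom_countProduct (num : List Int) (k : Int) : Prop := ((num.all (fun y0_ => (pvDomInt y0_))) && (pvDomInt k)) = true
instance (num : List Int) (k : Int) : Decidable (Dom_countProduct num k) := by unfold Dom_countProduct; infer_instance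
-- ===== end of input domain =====

-- ===== PORT A =====
-- B tracks the product in capped sign-magnitude form and scans a full flag list instead of breaking; same values always.
-- while loop of A: s is the exact running product; each step consumes the next element or breaks
def countProductLoop (num : List Int) (k : Int) (s : Int) : Int :=
  match num with
  | [] => 0
  | x :: xs => if s * x < k then 1 + countProductLoop xs k (s * x) else 0

def countProduct (num : List Int) (k : Int) : Int :=
  countProductLoop num k 1

-- ===== PORT B =====
-- state (sign, mag, zero): capped sign-magnitude representation of the running product
def pvStep (cap : Int) (st : Int × Int × Bool) (x : Int) : Int × Int × Bool :=
  if x = 0 then (st.1, st.2.1, true)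
  else if x < 0 then (-st.1, min (st.2.1 * (-x)) cap, st.2.2)
  else (st.1, min (st.2.1 * x) cap, st.2.2)

-- the below-k flag appended for the current state
def pvFlag (k : Int) (st : Int × Int × Bool) : Bool :=
  if st.2.2 then decide (0 < k)
  else if 0 < st.1 then decide (st.2.1 < k)
  else decide (-st.2.1 < k)

-- the for loop of B: build the full list of below-k flags
def pvBelow (cap k : Int) (st : Int × Int × Bool) (num : List Int) : List Bool :=
  match num with
  | [] => []
  | x :: xs =>
    let st' := pvStep cap st x
    pvFlag k st' :: pvBelow cap k st' xs

def countProduct_alt (num : List Int) (k : Int) : Int :=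
  let below := pvBelow (|k| + 1) k (1, 1, false) num
  if below.contains false then
    match PySem.List.index? below false with
    | some i => Int.ofNat i
    | none => Int.ofNat below.length   -- unreachable: guarded by the contains test
  else Int.ofNat below.length

-- ===== PRECONDITION & SPEC =====
def Spec_countProduct (num : List Int) (k : Int) (out : Int) : Prop := out = countProduct_alt num k
instance (num : List Int) (k : Int) (out : Int) : Decidable (Spec_countProduct num k out) := by unfold Spec_countProduct; infer_instance

-- ===== CLAIM (what is proved, stated in full; the proofs are below) =====
def Claim_equal_countProduct : Prop := ∀ (num : List Int) (k : Int), Dom_countProduct num k → Spec_countProduct num k (countProduct num k)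

-- ===== LEMMAS AND PROOFS =====

-- the capped state represents the exact product s
def pvRep (cap s : Int) (st : Int × Int × Bool) : Prop :=
  if s = 0 then st.2.2 = true
  else st.2.2 = false ∧
    ((0 < s ∧ st.1 = 1 ∧ st.2.1 = min s cap) ∨ (s < 0 ∧ st.1 = -1 ∧ st.2.1 = min (-s) cap))

theorem min_mul_cap (a b cap : Int) (_ha : 1 ≤ a) (hb : 1 ≤ b) (hc : 1 ≤ cap) :
    min (min a cap * b) cap = min (a * b) cap := by
  rcases le_or_gt a cap with h | h
  · rw [min_eq_left h]
  · have h1 : cap ≤ cap * b := le_mul_of_one_le_right (by omega) hb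
    have h2 : cap ≤ a * b := le_trans h1 (by nlinarith)
    rw [min_eq_right h.le, min_eq_right h1, min_eq_right h2]

theorem pvStep_rep (cap s x : Int) (st : Int × Int × Bool) (hc : 1 ≤ cap)
    (h : pvRep cap s st) : pvRep cap (s * x) (pvStep cap st x) := by
  unfold pvRep at h ⊢
  unfold pvStep
  by_cases hx0 : x = 0
  · simp [hx0]
  by_cases hs0 : s = 0
  · simp [hs0] at h ⊢
    split_ifs <;> simp [h]
  simp only [if_neg hs0] at h
  obtain ⟨hz, hcase⟩ := h
  have hsx : s * x ≠ 0 := mul_ne_zero hs0 hx0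
  simp only [if_neg hsx, hx0, if_false]
  rcases hcase with ⟨hs, h1, h2⟩ | ⟨hs, h1, h2⟩ <;>
    rcases lt_trichotomy x 0 with hx | hx | hx <;> try omega
  · -- s > 0, x < 0
    refine ⟨by simp [hx, hz], Or.inr ⟨mul_neg_of_pos_of_neg hs hx, by simp [hx, h1], ?_⟩⟩
    simp only [hx, if_pos, h2, neg_mul_eq_mul_neg]
    exact min_mul_cap s (-x) cap (by omega) (by omega) hc
  · -- s > 0, x > 0
    refine ⟨by simp [hx.not_gt.imp, hz, not_lt.mpr hx.le], Or.inl ⟨mul_pos hs hx, by simp [not_lt.mpr hx.le, h1], ?_⟩⟩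
    simp only [not_lt.mpr hx.le, if_false, h2]
    exact min_mul_cap s x cap (by omega) (by omega) hc
  · -- s < 0, x < 0
    refine ⟨by simp [hx, hz], Or.inl ⟨mul_pos_of_neg_of_neg hs hx, by simp [hx, h1], ?_⟩⟩
    simp only [hx, if_pos, h2]
    have : -s * -x = s * x := by ring
    rw [← this]
    exact min_mul_cap (-s) (-x) cap (by omega) (by omega) hc
  · -- s < 0, x > 0
    refine ⟨by simp [not_lt.mpr hx.le, hz], Or.inr ⟨mul_neg_of_neg_of_pos hs hx, by simp [not_lt.mpr hx.le, h1], ?_⟩⟩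
    simp only [not_lt.mpr hx.le, if_false, h2]
    have : -s * x = -(s * x) := by ring
    rw [← this]
    exact min_mul_cap (-s) x cap (by omega) (by omega) hc

theorem pvFlag_eq (k s : Int) (st : Int × Int × Bool)
    (h : pvRep (|k| + 1) s st) : pvFlag k st = decide (s < k) := by
  unfold pvRep at h
  unfold pvFlag
  by_cases hs0 : s = 0
  · simp [hs0] at h ⊢; simp [h]
  simp only [if_neg hs0] at h
  obtain ⟨hz, hcase⟩ := h
  rcases hcase with ⟨hs, h1, h2⟩ | ⟨hs, h1, h2⟩
  · simp only [hz, h1, h2]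
    have : (min s (|k| + 1) < k) = (s < k) := by
      rcases le_or_gt s (|k| + 1) with h | h
      · rw [min_eq_left h]
      · rw [min_eq_right h.le]
        have := abs_nonneg k
        have := le_abs_self k
        simp only [eq_iff_iff]
        omega
    simp [this]
  · simp only [hz, h1]
    have h11 : ¬ (0 : Int) < -1 := by omega
    simp only [h11, if_false, h2]
    have : (-min (-s) (|k| + 1) < k) = (s < k) := by
      rcases le_or_gt (-s) (|k| + 1) with h | h
      · rw [min_eq_left h]; simp
      · rw [min_eq_right h.le]
        have := abs_nonneg k
        have := neg_abs_le k
        simp only [eq_iff_iff]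
        omega
    simp [this]

-- the exact flag list A's comparisons would produce
def pvExact (k s : Int) (num : List Int) : List Bool :=
  match num with
  | [] => []
  | x :: xs => decide (s * x < k) :: pvExact k (s * x) xs

theorem pvBelow_eq_exact (k : Int) (num : List Int) (s : Int) (st : Int × Int × Bool)
    (h : pvRep (|k| + 1) s st) :
    pvBelow (|k| + 1) k st num = pvExact k s num := by
  induction num generalizing s st with
  | nil => rfl
  | cons x xs ih =>
    have hc : (1 : Int) ≤ |k| + 1 := by have := abs_nonneg k; omega
    have hst' := pvStep_rep (|k| + 1) s x st hc h
    simp only [pvBelow, pvExact]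
    exact congrArg₂ _ (pvFlag_eq k (s * x) _ hst') (ih (s * x) _ hst')

-- A's loop counts the leading true run of the exact flag list
theorem loop_eq_leading (num : List Int) (k s : Int) :
    countProductLoop num k s =
    Int.ofNat ((pvExact k s num).takeWhile id).length := by
  induction num generalizing s with
  | nil => simp [countProductLoop, pvExact]
  | cons x xs ih =>
    simp only [countProductLoop, pvExact, List.takeWhile]
    by_cases h : s * x < k
    · simp [h, ih]; omega
    · simp [h]

-- the index-of-first-false computation returns the leading true run length
theorem index_false_eq_leading (bs : List Bool) :
    (if bs.contains false then
      match PySem.List.index? bs false with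
      | some i => Int.ofNat i
      | none => Int.ofNat bs.length
     else Int.ofNat bs.length) = Int.ofNat ((bs.takeWhile id).length) := by
  simp only [PySem.List.index?_eq_idxOf?]
  induction bs with
  | nil => simp
  | cons b bs ih =>
    cases b with
    | false => simp [List.idxOf?_cons, List.takeWhile]
    | true =>
      simp only [List.contains_cons, List.idxOf?_cons, List.takeWhile]
      by_cases h : bs.contains false
      · have hs : (List.idxOf? false bs).isSome := by
          rw [← PySem.List.index?_eq_idxOf?]
          exact (PySem.List.index?_isSome_iff bs false).mpr (by simpa using h)
        obtain ⟨i, hidx⟩ := Option.isSome_iff_exists.mp hs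
        have hm : false ∈ bs := by simpa using h
        simp [hm, hidx] at ih
        simp [hm, hidx, ← ih]
      · have hm : false ∉ bs := by simpa using h
        have hidx : List.idxOf? false bs = none := by
          rw [← PySem.List.index?_eq_idxOf?]
          exact (PySem.List.index?_eq_none_iff bs false).mpr (by simpa using h)
        simp [hm] at ih
        simp [hm, ← ih]

-- ===== VERDICT (by name: the statement is the Claim_ definition above) =====
theorem countProduct_spec : Claim_equal_countProduct := by
  intro num k _
  unfold Spec_countProduct countProduct countProduct_alt
  have hrep : pvRep (|k| + 1) 1 ((1 : Int), (1 : Int), false) := by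
    unfold pvRep
    norm_num
  rw [pvBelow_eq_exact k num 1 _ hrep, index_false_eq_leading, loop_eq_leading]
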